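-- pv_equiv track=rewrite | github.com/hivemindaibot/hive-ai-onebrain-proof | brain/io/probes.py | _detect_conflicting_keywords
-- ===== SOURCE A (Python) =====
-- from typing import Dict, Iterable, List, Optional, Sequence, Set
--
-- def _detect_conflicting_keywords(tokens_a: Set[str], tokens_b: Set[str]) -> Set[str]:
--     """Identify obvious antonym or polarity disagreements."""
--     conflicts: Set[str] = set()
--     antonym_pairs = [
--         ("enable", "disable"),
--         ("enabled", "disabled"),
--         ("allow", "forbid"),
--         ("allows", "forbids"),
--         ("increase", "decrease"),
--         ("allowed", "prohibited"),
--         ("supports", "prevents"),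
--     ]
--     for pos_word, neg_word in antonym_pairs:
--         if (pos_word in tokens_a and neg_word in tokens_b) or (pos_word in tokens_b and neg_word in tokens_a):
--             conflicts.update({pos_word, neg_word})
--     return conflicts
-- ===== SOURCE B (Python) =====
-- _PAIRS = [
--     ("enable", "disable"),
--     ("enabled", "disabled"),
--     ("allow", "forbid"),
--     ("allows", "forbids"),
--     ("increase", "decrease"),
--     ("allowed", "prohibited"),
--     ("supports", "prevents"),
-- ]
--
-- # word -> (pair index, opposite word), both directions
-- _WORD_INFO = {}
-- for _i, (_pos, _neg) in enumerate(_PAIRS):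
--     _WORD_INFO[_pos] = (_i, _neg)
--     _WORD_INFO[_neg] = (_i, _pos)
--
--
-- def _detect_conflicting_keywords(tokens_a, tokens_b):
--     """Identify obvious antonym or polarity disagreements."""
--     hit_pairs = set()
--     for word in tokens_a:
--         info = _WORD_INFO.get(word)
--         if info is not None and info[1] in tokens_b:
--             hit_pairs.add(info[0])
--     conflicts = set()
--     for i in sorted(hit_pairs):
--         conflicts.update(_PAIRS[i])
--     return conflicts
-- ===== Notes on version B (the rewrite author's own statement) =====
-- stated objective: alternative
-- what changed: Replaces A's scan of the antonym-pair table by a token-driven pass: a word->(pair index, opposite) dict is indexed by each token of tokens_a, clashing pair indices are collected in a set, and the conflict set is rebuilt from the sorted indices.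
import Mathlib
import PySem

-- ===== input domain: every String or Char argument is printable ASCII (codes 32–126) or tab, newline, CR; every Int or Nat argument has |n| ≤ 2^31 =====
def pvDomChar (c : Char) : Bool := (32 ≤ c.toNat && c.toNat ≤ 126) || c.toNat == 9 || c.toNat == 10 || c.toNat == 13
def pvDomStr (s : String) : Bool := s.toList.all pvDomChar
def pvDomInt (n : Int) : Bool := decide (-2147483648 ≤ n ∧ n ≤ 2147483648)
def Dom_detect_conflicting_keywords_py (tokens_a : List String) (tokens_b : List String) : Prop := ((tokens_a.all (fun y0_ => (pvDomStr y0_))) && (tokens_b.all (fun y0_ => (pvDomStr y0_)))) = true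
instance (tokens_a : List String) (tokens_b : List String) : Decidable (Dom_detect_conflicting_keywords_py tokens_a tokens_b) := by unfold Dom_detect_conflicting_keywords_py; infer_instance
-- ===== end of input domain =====

-- B replaces A's scan of the antonym-pair table by a token-driven pass: each token of tokens_a is
-- looked up in a word→(pair index, opposite) dict, clashing pair indices are collected in a set,
-- and the conflict set is rebuilt from the sorted indices (objective: alternative).
-- Return value only; neither version mutates its arguments.

-- ===== PORT A =====
-- A's fixed antonym pair list
def pvPairsA : List (String × String) :=
  [("enable", "disable"), ("enabled", "disabled"), ("allow", "forbid"),
   ("allows", "forbids"), ("increase", "decrease"), ("allowed", "prohibited"),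
   ("supports", "prevents")]

-- literal port of A: fold over the pair list; conflicts.update({pos, neg}) on a clash
-- (the iteration order of the two-element Python set literal is not observable; ported as [pos, neg])
def detect_conflicting_keywords_py (tokens_a : List String) (tokens_b : List String) : List String :=
  pvPairsA.foldl
    (fun conflicts pn =>
      if (PySem.Set.contains tokens_a pn.1 && PySem.Set.contains tokens_b pn.2)
         || (PySem.Set.contains tokens_b pn.1 && PySem.Set.contains tokens_a pn.2)
      then PySem.Set.update conflicts [pn.1, pn.2]
      else conflicts)
    PySem.Set.empty

-- ===== PORT B =====
-- B's module constant _PAIRS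
def pvPairsB : List (String × String) :=
  [("enable", "disable"), ("enabled", "disabled"), ("allow", "forbid"),
   ("allows", "forbids"), ("increase", "decrease"), ("allowed", "prohibited"),
   ("supports", "prevents")]

-- B's module-level loop building _WORD_INFO: word -> (pair index, opposite word), both directions
def pvWordInfo : PySem.Dict String (Int × String) :=
  (PySem.List.enumerate pvPairsB).foldl
    (fun d ip => (d.insert ip.2.1 (ip.1, ip.2.2)).insert ip.2.2 (ip.1, ip.2.1))
    PySem.Dict.empty

-- literal port of B: one pass over tokens_a collecting clashing pair indices (a set of ints;
-- its Python iteration order is normalised away by sorted() before it is consumed), then the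
-- conflict set rebuilt from the sorted indices.  _PAIRS[i] has i a stored dict value, always in
-- range, so the total pyGetD form is exact; conflicts.update(_PAIRS[i]) iterates the tuple as [pos, neg].
def detect_conflicting_keywords_py_alt (tokens_a : List String) (tokens_b : List String) : List String :=
  (PySem.List.sorted
      (tokens_a.foldl
        (fun hp word =>
          match PySem.Dict.get? pvWordInfo word with
          | some info => if PySem.Set.contains tokens_b info.2 then PySem.Set.add hp info.1 else hp
          | none => hp)
        PySem.Set.empty)
      (fun x => x) false).foldl
    (fun conflicts i =>
      PySem.Set.update conflicts
        [(PySem.List.pyGetD pvPairsB i ("", "")).1, (PySem.List.pyGetD pvPairsB i ("", "")).2])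
    PySem.Set.empty

-- ===== PRECONDITION & SPEC =====
def Spec_detect_conflicting_keywords_py (tokens_a : List String) (tokens_b : List String) (out : List String) : Prop := out = detect_conflicting_keywords_py_alt tokens_a tokens_b
instance (tokens_a : List String) (tokens_b : List String) (out : List String) : Decidable (Spec_detect_conflicting_keywords_py tokens_a tokens_b out) := by unfold Spec_detect_conflicting_keywords_py; infer_instance

-- ===== CLAIM (what is proved, stated in full; the proofs are below) =====
def Claim_equal_detect_conflicting_keywords_py : Prop := ∀ (tokens_a : List String) (tokens_b : List String), Dom_detect_conflicting_keywords_py tokens_a tokens_b → Spec_detect_conflicting_keywords_py tokens_a tokens_b (detect_conflicting_keywords_py tokens_a tokens_b)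

-- ===== LEMMAS AND PROOFS =====

-- the symmetric clash test of a pair, shared normal form of both programs
def pvClash (ta tb : List String) (w o : String) : Bool :=
  (PySem.Set.contains ta w && PySem.Set.contains tb o)
  || (PySem.Set.contains tb w && PySem.Set.contains ta o)

-- all words of a pair list, in order
def pvWords (ps : List (String × String)) : List String :=
  ps.flatMap (fun pn => [pn.1, pn.2])

-- the common normal form of the result: clashing pairs in pair order, each contributing [pos, neg]
def pvCanon (ta tb : List String) (ps : List (String × String)) : List String :=
  pvWords (ps.filter (fun pn => pvClash ta tb pn.1 pn.2))

-- proof views of B's token step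
def pvCond (tb : List String) (w : String) : Bool :=
  match PySem.Dict.get? pvWordInfo w with
  | some info => PySem.Set.contains tb info.2
  | none => false

def pvIdxOf (w : String) : Int := ((PySem.Dict.get? pvWordInfo w).getD (0, "")).1

def pvPairAt (i : Int) : String × String := PySem.List.pyGetD pvPairsB i ("", "")

-- the clashing pair indices, in increasing order
def pvIdxList (ta tb : List String) : List Int :=
  ([0, 1, 2, 3, 4, 5, 6] : List Int).filter
    (fun i => pvClash ta tb (pvPairAt i).1 (pvPairAt i).2)

theorem pvCanon_cons (ta tb : List String) (pn : String × String) (t : List (String × String)) :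
    pvCanon ta tb (pn :: t)
      = if pvClash ta tb pn.1 pn.2 then pn.1 :: pn.2 :: pvCanon ta tb t else pvCanon ta tb t := by
  by_cases hc : pvClash ta tb pn.1 pn.2 = true <;>
    simp [pvCanon, pvWords, hc]

theorem pvCanon_sublist (ta tb : List String) (ps : List (String × String)) :
    (pvCanon ta tb ps).Sublist (pvWords ps) :=
  List.Sublist.flatMap List.filter_sublist _

theorem pvWordsA_nodup : (pvWords pvPairsA).Nodup := by decide

-- a fold of Set.update over pairs whose words are fresh and pairwise distinct appends them all
theorem pvFoldUpd :
    ∀ (ps : List (String × String)) (s : List String),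
      (s ++ pvWords ps).Nodup →
      ps.foldl (fun c pn => PySem.Set.update c [pn.1, pn.2]) s = s ++ pvWords ps := by
  intro ps
  induction ps with
  | nil => intro s _; simp [pvWords]
  | cons pn t ih =>
    intro s h
    have h' : ((s ++ [pn.1, pn.2]) ++ pvWords t).Nodup := by
      simpa [pvWords, List.append_assoc] using h
    have hnd : (s ++ [pn.1, pn.2]).Nodup := h'.of_append_left
    have hdisj : ∀ x ∈ [pn.1, pn.2], x ∉ s := by
      intro x hx hxs
      exact List.disjoint_of_nodup_append hnd hxs hx
    have hupd : PySem.Set.update s [pn.1, pn.2] = s ++ [pn.1, pn.2] := by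
      apply PySem.Set.update_eq_append_of_disjoint
      · exact (List.nodup_append.mp hnd).2.1
      · exact hdisj
    rw [List.foldl_cons, hupd, ih (s ++ [pn.1, pn.2]) h']
    simp [pvWords]

-- A's fold over a pair list with pairwise-distinct words builds the normal form
theorem pvFoldA (ta tb : List String) :
    ∀ (ps : List (String × String)) (s : List String),
      (s ++ pvWords ps).Nodup →
      ps.foldl
        (fun conflicts pn =>
          if pvClash ta tb pn.1 pn.2
          then PySem.Set.update conflicts [pn.1, pn.2]
          else conflicts) s
      = s ++ pvCanon ta tb ps := by
  intro ps
  induction ps with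
  | nil => intro s _; simp [pvCanon, pvWords]
  | cons pn t ih =>
    intro s h
    have h' : ((s ++ [pn.1, pn.2]) ++ pvWords t).Nodup := by
      simpa [pvWords, List.append_assoc] using h
    rw [List.foldl_cons, pvCanon_cons]
    by_cases hc : pvClash ta tb pn.1 pn.2 = true
    · have hnd : (s ++ [pn.1, pn.2]).Nodup := h'.of_append_left
      have hdisj : ∀ x ∈ [pn.1, pn.2], x ∉ s := by
        intro x hx hxs
        exact List.disjoint_of_nodup_append hnd hxs hx
      have hupd : PySem.Set.update s [pn.1, pn.2] = s ++ [pn.1, pn.2] := by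
        apply PySem.Set.update_eq_append_of_disjoint
        · exact (List.nodup_append.mp hnd).2.1
        · exact hdisj
      rw [if_pos hc, if_pos hc, hupd, ih (s ++ [pn.1, pn.2]) h']
      simp
    · have hnd2 : (s ++ pvWords t).Nodup := by
        have hsub : ((s ++ pvWords t)).Sublist ((s ++ [pn.1, pn.2]) ++ pvWords t) := by
          simp [List.append_assoc]
        exact hsub.nodup h'
      rw [if_neg hc, if_neg hc, ih s hnd2]

-- the built dict, enumerated
theorem pvWordInfo_items :
    pvWordInfo.items
      = [("enable", ((0 : Int), "disable")), ("disable", ((0 : Int), "enable")),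
         ("enabled", ((1 : Int), "disabled")), ("disabled", ((1 : Int), "enabled")),
         ("allow", ((2 : Int), "forbid")), ("forbid", ((2 : Int), "allow")),
         ("allows", ((3 : Int), "forbids")), ("forbids", ((3 : Int), "allows")),
         ("increase", ((4 : Int), "decrease")), ("decrease", ((4 : Int), "increase")),
         ("allowed", ((5 : Int), "prohibited")), ("prohibited", ((5 : Int), "allowed")),
         ("supports", ((6 : Int), "prevents")), ("prevents", ((6 : Int), "supports"))] := by
  decide

-- the dict's lookups at its fourteen keys
theorem pvGet_enable : PySem.Dict.get? pvWordInfo "enable" = some (0, "disable") := by decide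
theorem pvGet_disable : PySem.Dict.get? pvWordInfo "disable" = some (0, "enable") := by decide
theorem pvGet_enabled : PySem.Dict.get? pvWordInfo "enabled" = some (1, "disabled") := by decide
theorem pvGet_disabled : PySem.Dict.get? pvWordInfo "disabled" = some (1, "enabled") := by decide
theorem pvGet_allow : PySem.Dict.get? pvWordInfo "allow" = some (2, "forbid") := by decide
theorem pvGet_forbid : PySem.Dict.get? pvWordInfo "forbid" = some (2, "allow") := by decide
theorem pvGet_allows : PySem.Dict.get? pvWordInfo "allows" = some (3, "forbids") := by decide
theorem pvGet_forbids : PySem.Dict.get? pvWordInfo "forbids" = some (3, "allows") := by decide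
theorem pvGet_increase : PySem.Dict.get? pvWordInfo "increase" = some (4, "decrease") := by decide
theorem pvGet_decrease : PySem.Dict.get? pvWordInfo "decrease" = some (4, "increase") := by decide
theorem pvGet_allowed : PySem.Dict.get? pvWordInfo "allowed" = some (5, "prohibited") := by decide
theorem pvGet_prohibited : PySem.Dict.get? pvWordInfo "prohibited" = some (5, "allowed") := by decide
theorem pvGet_supports : PySem.Dict.get? pvWordInfo "supports" = some (6, "prevents") := by decide
theorem pvGet_prevents : PySem.Dict.get? pvWordInfo "prevents" = some (6, "supports") := by decide

-- the pair table at its seven indices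
theorem pvPairAt0 : pvPairAt 0 = ("enable", "disable") := by decide
theorem pvPairAt1 : pvPairAt 1 = ("enabled", "disabled") := by decide
theorem pvPairAt2 : pvPairAt 2 = ("allow", "forbid") := by decide
theorem pvPairAt3 : pvPairAt 3 = ("allows", "forbids") := by decide
theorem pvPairAt4 : pvPairAt 4 = ("increase", "decrease") := by decide
theorem pvPairAt5 : pvPairAt 5 = ("allowed", "prohibited") := by decide
theorem pvPairAt6 : pvPairAt 6 = ("supports", "prevents") := by decide

-- B's token step as a conditional Set.add
theorem pvStep_eq (tb : List String) :
    (fun (hp : List Int) (word : String) =>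
        match PySem.Dict.get? pvWordInfo word with
        | some info => if PySem.Set.contains tb info.2 then PySem.Set.add hp info.1 else hp
        | none => hp)
      = fun hp word => if pvCond tb word then PySem.Set.add hp (pvIdxOf word) else hp := by
  funext hp word
  cases h : PySem.Dict.get? pvWordInfo word <;> simp [pvCond, pvIdxOf, h]

-- a pair index is collected iff its pair clashes
theorem pvHit_iff (ta tb : List String) (i : Int) :
    (∃ w, w ∈ ta ∧ pvCond tb w = true ∧ pvIdxOf w = i) ↔ i ∈ pvIdxList ta tb := by
  constructor
  · rintro ⟨w, hw, hc, hi⟩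
    unfold pvCond at hc
    cases hg : PySem.Dict.get? pvWordInfo w with
    | none => rw [hg] at hc; simp at hc
    | some info =>
      rw [hg] at hc
      have hmb : info.2 ∈ tb := by simpa using hc
      have hitems : (w, info) ∈ pvWordInfo.items :=
        PySem.Dict.mem_items_of_get?_eq_some pvWordInfo hg
      rw [pvWordInfo_items] at hitems
      unfold pvIdxOf at hi
      rw [hg] at hi
      simp only [Option.getD_some] at hi
      simp only [List.mem_cons, List.not_mem_nil, or_false, Prod.mk.injEq] at hitems
      rcases hitems with ⟨h1, h2⟩|⟨h1, h2⟩|⟨h1, h2⟩|⟨h1, h2⟩|⟨h1, h2⟩|⟨h1, h2⟩|⟨h1, h2⟩|⟨h1, h2⟩|⟨h1, h2⟩|⟨h1, h2⟩|⟨h1, h2⟩|⟨h1, h2⟩|⟨h1, h2⟩|⟨h1, h2⟩ <;>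
        (subst h1; subst h2; rw [← hi];
         simp [pvIdxList, pvPairAt0, pvPairAt1, pvPairAt2, pvPairAt3,
               pvPairAt4, pvPairAt5, pvPairAt6, pvClash, hw, hmb])
  · intro h
    simp only [pvIdxList, List.mem_filter, List.mem_cons, List.not_mem_nil, or_false] at h
    obtain ⟨hi, hcl⟩ := h
    rcases hi with rfl|rfl|rfl|rfl|rfl|rfl|rfl
    · rw [pvPairAt0] at hcl
      simp only [pvClash, Bool.or_eq_true, Bool.and_eq_true] at hcl
      rcases hcl with ⟨h1, h2⟩ | ⟨h1, h2⟩
      · exact ⟨"enable", by simpa using h1, by unfold pvCond; rw [pvGet_enable]; exact h2, by decide⟩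
      · exact ⟨"disable", by simpa using h2, by unfold pvCond; rw [pvGet_disable]; exact h1, by decide⟩
    · rw [pvPairAt1] at hcl
      simp only [pvClash, Bool.or_eq_true, Bool.and_eq_true] at hcl
      rcases hcl with ⟨h1, h2⟩ | ⟨h1, h2⟩
      · exact ⟨"enabled", by simpa using h1, by unfold pvCond; rw [pvGet_enabled]; exact h2, by decide⟩
      · exact ⟨"disabled", by simpa using h2, by unfold pvCond; rw [pvGet_disabled]; exact h1, by decide⟩
    · rw [pvPairAt2] at hcl
      simp only [pvClash, Bool.or_eq_true, Bool.and_eq_true] at hcl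
      rcases hcl with ⟨h1, h2⟩ | ⟨h1, h2⟩
      · exact ⟨"allow", by simpa using h1, by unfold pvCond; rw [pvGet_allow]; exact h2, by decide⟩
      · exact ⟨"forbid", by simpa using h2, by unfold pvCond; rw [pvGet_forbid]; exact h1, by decide⟩
    · rw [pvPairAt3] at hcl
      simp only [pvClash, Bool.or_eq_true, Bool.and_eq_true] at hcl
      rcases hcl with ⟨h1, h2⟩ | ⟨h1, h2⟩
      · exact ⟨"allows", by simpa using h1, by unfold pvCond; rw [pvGet_allows]; exact h2, by decide⟩
      · exact ⟨"forbids", by simpa using h2, by unfold pvCond; rw [pvGet_forbids]; exact h1, by decide⟩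
    · rw [pvPairAt4] at hcl
      simp only [pvClash, Bool.or_eq_true, Bool.and_eq_true] at hcl
      rcases hcl with ⟨h1, h2⟩ | ⟨h1, h2⟩
      · exact ⟨"increase", by simpa using h1, by unfold pvCond; rw [pvGet_increase]; exact h2, by decide⟩
      · exact ⟨"decrease", by simpa using h2, by unfold pvCond; rw [pvGet_decrease]; exact h1, by decide⟩
    · rw [pvPairAt5] at hcl
      simp only [pvClash, Bool.or_eq_true, Bool.and_eq_true] at hcl
      rcases hcl with ⟨h1, h2⟩ | ⟨h1, h2⟩
      · exact ⟨"allowed", by simpa using h1, by unfold pvCond; rw [pvGet_allowed]; exact h2, by decide⟩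
      · exact ⟨"prohibited", by simpa using h2, by unfold pvCond; rw [pvGet_prohibited]; exact h1, by decide⟩
    · rw [pvPairAt6] at hcl
      simp only [pvClash, Bool.or_eq_true, Bool.and_eq_true] at hcl
      rcases hcl with ⟨h1, h2⟩ | ⟨h1, h2⟩
      · exact ⟨"supports", by simpa using h1, by unfold pvCond; rw [pvGet_supports]; exact h2, by decide⟩
      · exact ⟨"prevents", by simpa using h2, by unfold pvCond; rw [pvGet_prevents]; exact h1, by decide⟩

-- the collected index set, normalised
theorem pvHits_eq (ta tb : List String) :
    ta.foldl
        (fun hp word =>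
          match PySem.Dict.get? pvWordInfo word with
          | some info => if PySem.Set.contains tb info.2 then PySem.Set.add hp info.1 else hp
          | none => hp)
        PySem.Set.empty
      = PySem.Set.ofList ((ta.filter (pvCond tb)).map pvIdxOf) := by
  rw [pvStep_eq]
  rw [PySem.List.foldl_if_eq_foldl_filter]
  rw [← PySem.Set.update_map_eq_foldl_add]
  exact PySem.Set.update_nil_left _

-- sorting the collected indices gives exactly the increasing clash-index list
theorem pvSorted_eq (ta tb : List String) :
    PySem.List.sorted (PySem.Set.ofList ((ta.filter (pvCond tb)).map pvIdxOf)) (fun x => x) false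
      = pvIdxList ta tb := by
  apply PySem.List.sorted_eq_of_perm_of_pairwise_lt
  · apply (List.perm_ext_iff_of_nodup ?nd1 ?nd2).mpr
    case nd1 =>
      exact List.Nodup.filter _ (by decide)
    case nd2 =>
      exact PySem.Set.nodup_ofList _
    intro a
    rw [← pvHit_iff ta tb a]
    simp only [PySem.Set.mem_ofList, List.mem_map, List.mem_filter]
    constructor
    · rintro ⟨w, hw, hc, hi⟩; exact ⟨w, ⟨hw, hc⟩, hi⟩
    · rintro ⟨w, ⟨hw, hc⟩, hi⟩; exact ⟨w, hw, hc, hi⟩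
  · exact List.Pairwise.filter _ (by decide)

-- mapping the clash-index list through the pair table filters the pair table
theorem pvMapIdx (ta tb : List String) :
    (pvIdxList ta tb).map pvPairAt
      = pvPairsA.filter (fun pn => pvClash ta tb pn.1 pn.2) := by
  have h : pvPairsA = ([0, 1, 2, 3, 4, 5, 6] : List Int).map pvPairAt := by decide
  rw [h, List.filter_map]
  rfl

-- ===== VERDICT (by name: the statement is the Claim_ definition above) =====
theorem detect_conflicting_keywords_py_spec : Claim_equal_detect_conflicting_keywords_py := by
  intro ta tb _
  show detect_conflicting_keywords_py ta tb = detect_conflicting_keywords_py_alt ta tb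
  have hA : detect_conflicting_keywords_py ta tb = pvCanon ta tb pvPairsA := by
    have := pvFoldA ta tb pvPairsA PySem.Set.empty (by simpa using pvWordsA_nodup)
    simpa [PySem.Set.empty] using this
  have hnd : (pvCanon ta tb pvPairsA).Nodup :=
    (pvCanon_sublist ta tb pvPairsA).nodup pvWordsA_nodup
  have hB : detect_conflicting_keywords_py_alt ta tb = pvCanon ta tb pvPairsA := by
    unfold detect_conflicting_keywords_py_alt
    rw [pvHits_eq, pvSorted_eq]
    show (pvIdxList ta tb).foldl
        (fun conflicts i => PySem.Set.update conflicts [(pvPairAt i).1, (pvPairAt i).2])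
        PySem.Set.empty = _
    rw [← List.foldl_map]
    rw [show (fun i => [(pvPairAt i).1, (pvPairAt i).2])
          = ((fun pn : String × String => [pn.1, pn.2]) ∘ pvPairAt) from rfl]
    rw [← List.map_map, pvMapIdx, List.foldl_map]
    have := pvFoldUpd (pvPairsA.filter (fun pn => pvClash ta tb pn.1 pn.2)) []
      (by simpa [pvCanon] using hnd)
    simpa [PySem.Set.empty, pvCanon] using this
  rw [hA, hB]
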